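-- pv_equiv track=rewrite | github.com/ribeiroale/ares | ares/kpicalc.py | time_between_failures
-- ===== SOURCE A (Python) =====
-- def time_between_failures(N, rep_data):
--     K = len(rep_data)
--     TBF = list()
--     for n in range(0, N+1):
--         TBF.append([])
--         k = 0
--         while k < K:
--             try:
--                 tmp = rep_data[k][n]
--             except IndexError:
--                 break
--             TBF[-1].append(tmp)
--             k = k + 1
--     return TBF
-- ===== SOURCE B (Python) =====
-- def time_between_failures(N, rep_data):
--     if N < 0:
--         return []
--     TBF = [[] for _ in range(N + 1)]
--     open_ = [True] * (N + 1)
--     for row in rep_data: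
--         L = len(row)
--         for n in range(N + 1):
--             if open_[n]:
--                 if n < L:
--                     TBF[n].append(row[n])
--                 else:
--                     open_[n] = False
--     return TBF
-- ===== Notes on version B (the rewrite author's own statement) =====
-- stated objective: alternative
-- what changed: Inverts the loop nesting: instead of A's column-outer loop that rescans the rows for every column and breaks on IndexError, B makes one row-major pass over rep_data, appending row[n] to each still-open column and closing a column permanently at the first row too short for it.
import Mathlib
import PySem

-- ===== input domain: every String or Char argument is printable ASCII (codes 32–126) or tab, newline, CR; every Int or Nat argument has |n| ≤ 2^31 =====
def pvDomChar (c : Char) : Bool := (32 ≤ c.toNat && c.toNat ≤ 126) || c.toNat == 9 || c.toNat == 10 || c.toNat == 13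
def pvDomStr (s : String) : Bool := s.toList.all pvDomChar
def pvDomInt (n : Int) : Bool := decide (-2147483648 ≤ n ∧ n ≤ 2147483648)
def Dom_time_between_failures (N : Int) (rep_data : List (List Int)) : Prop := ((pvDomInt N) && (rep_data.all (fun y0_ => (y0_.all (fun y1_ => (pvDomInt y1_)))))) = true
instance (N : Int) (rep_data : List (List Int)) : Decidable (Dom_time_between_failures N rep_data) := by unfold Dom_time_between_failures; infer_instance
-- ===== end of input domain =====

-- B inverts A's loop nesting (one row-major pass closing columns with open-flags, instead of
-- a column-outer loop rescanning the rows and breaking on IndexError); objective: alternative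
-- decomposition, same cost.

-- ===== PORT A =====
-- A's inner 'while k < K: try rep_data[k][n] except IndexError: break' loop, as structural
-- recursion over the rows in order (pyGet? = none is exactly the IndexError case).
def pvColA (rows : List (List Int)) (n : Int) : List Int :=
  match rows with
  | [] => []
  | row :: rest =>
    match PySem.List.pyGet? row n with
    | none => []
    | some tmp => tmp :: pvColA rest n

def time_between_failures (N : Int) (rep_data : List (List Int)) : List (List Int) :=
  (PySem.List.pyRange 0 (N + 1) 1).foldl (fun TBF n => TBF ++ [pvColA rep_data n]) []

-- ===== PORT B =====
-- one row: for each still-open column n, append row[n] if n < len(row), else close it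
def pvStepRow (st : List (List Int × Bool)) (row : List Int) : List (List Int × Bool) :=
  st.mapIdx (fun n p =>
    if p.2 then
      if n < row.length then (p.1 ++ [row.getD n 0], true) else (p.1, false)
    else p)

def time_between_failures_alt (N : Int) (rep_data : List (List Int)) : List (List Int) :=
  if N < 0 then []
  else
    let init : List (List Int × Bool) :=
      (List.range (N + 1).toNat).map (fun _ => (([] : List Int), true))
    (rep_data.foldl pvStepRow init).map (·.1)

-- ===== PRECONDITION & SPEC =====
def Spec_time_between_failures (N : Int) (rep_data : List (List Int)) (out : List (List Int)) : Prop := out = time_between_failures_alt N rep_data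
instance (N : Int) (rep_data : List (List Int)) (out : List (List Int)) : Decidable (Spec_time_between_failures N rep_data out) := by unfold Spec_time_between_failures; infer_instance

-- ===== CLAIM (what is proved, stated in full; the proofs are below) =====
def Claim_equal_time_between_failures : Prop := ∀ (N : Int) (rep_data : List (List Int)), Dom_time_between_failures N rep_data → Spec_time_between_failures N rep_data (time_between_failures N rep_data)

-- ===== LEMMAS AND PROOFS =====

-- reference column content / open-flag, indexed by Nat
def pvColN : List (List Int) → Nat → List Int
  | [], _ => []
  | r :: rs, n => if n < r.length then r.getD n 0 :: pvColN rs n else []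

def pvOpnN (rows : List (List Int)) (n : Nat) : Bool :=
  rows.all (fun r => decide (n < r.length))

theorem pvColA_eq (rows : List (List Int)) (n : Nat) :
    pvColA rows (n : Int) = pvColN rows n := by
  induction rows with
  | nil => rfl
  | cons r rs ih =>
    simp only [pvColA, pvColN, PySem.List.pyGet?_natCast]
    by_cases h : n < r.length
    · rw [List.getElem?_eq_getElem h]
      simp [ih, h, List.getD]
    · rw [List.getElem?_eq_none (by omega)]
      simp [h]

theorem pvMapIdx_map_range {β : Type} (m : Nat) (f : Nat → β) (g : Nat → β → β) :
    ((List.range m).map f).mapIdx g = (List.range m).map (fun n => g n (f n)) := by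
  apply List.ext_getElem
  · simp
  · intro i h1 h2
    simp

theorem pvColN_snoc (pref : List (List Int)) (r : List Int) (n : Nat) :
    pvColN (pref ++ [r]) n =
      if pvOpnN pref n then
        (if n < r.length then pvColN pref n ++ [r.getD n 0] else pvColN pref n)
      else pvColN pref n := by
  induction pref with
  | nil => simp [pvColN, pvOpnN]
  | cons p pref ih =>
    simp only [List.cons_append, pvColN, pvOpnN, List.all_cons] at *
    by_cases hp : n < p.length
    · simp [hp, ih]
      split_ifs <;> simp_all
    · simp [hp]

theorem pvOpnN_snoc (pref : List (List Int)) (r : List Int) (n : Nat) :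
    pvOpnN (pref ++ [r]) n = (pvOpnN pref n && decide (n < r.length)) := by
  simp [pvOpnN, List.all_append, List.all_cons]

theorem pvStep_state (pref : List (List Int)) (r : List Int) (m : Nat) :
    pvStepRow ((List.range m).map (fun n => (pvColN pref n, pvOpnN pref n))) r =
      (List.range m).map (fun n => (pvColN (pref ++ [r]) n, pvOpnN (pref ++ [r]) n)) := by
  unfold pvStepRow
  rw [pvMapIdx_map_range]
  apply List.map_congr_left
  intro n _
  rw [pvColN_snoc, pvOpnN_snoc]
  by_cases ho : pvOpnN pref n
  · by_cases hl : n < r.length <;> simp [ho, hl]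
  · simp [ho]

theorem pvFoldl_state (rows : List (List Int)) (pref : List (List Int)) (m : Nat) :
    rows.foldl pvStepRow ((List.range m).map (fun n => (pvColN pref n, pvOpnN pref n))) =
      (List.range m).map (fun n => (pvColN (pref ++ rows) n, pvOpnN (pref ++ rows) n)) := by
  induction rows generalizing pref with
  | nil => simp
  | cons r rs ih =>
    simp only [List.foldl_cons]
    rw [pvStep_state, ih]
    simp

theorem pvFoldl_append {α : Type} (l : List α) (f : α → List Int) (acc : List (List Int)) :
    l.foldl (fun acc n => acc ++ [f n]) acc = acc ++ l.map f := by
  induction l generalizing acc with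
  | nil => simp
  | cons x xs ih => simp [ih]

theorem time_between_failures_spec : Claim_equal_time_between_failures := by
  intro N rep_data _
  unfold Spec_time_between_failures time_between_failures time_between_failures_alt
  by_cases hN : N < 0
  · rw [PySem.List.pyRange_one_eq_nil (by omega)]
    simp [hN]
  · rw [PySem.List.pyRange_one]
    simp only [sub_zero, hN, if_false]
    rw [pvFoldl_append]
    have hinit : (List.range (N + 1).toNat).map (fun _ => (([] : List Int), true)) =
        (List.range (N + 1).toNat).map (fun n => (pvColN [] n, pvOpnN [] n)) := by
      simp [pvColN, pvOpnN]
    rw [hinit, pvFoldl_state]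
    simp [pvColA_eq]
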